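-- pv_equiv track=rewrite | github.com/0x32767/Python-British-Informatics-Olympiad-Solutions | 2006/question2.py | make_all_patterns
-- ===== SOURCE A (Python) =====
-- def make_all_patterns(structured_pattern: list[tuple[str, str]]):
--     if structured_pattern == []:
--         yield ""
--         return
--
--     pattern, pattern_type = structured_pattern.pop(0)
--
--     if pattern_type == "=":
--         for pattern_tail in make_all_patterns(structured_pattern.copy()):
--             yield pattern + pattern_tail
--
--     elif pattern_type == "?":
--         for pattern_tail in make_all_patterns(structured_pattern.copy()):
--             yield pattern + pattern_tail
--             yield pattern_tail
--
--     elif pattern_type == "*":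
--         for pattern_tail in make_all_patterns(structured_pattern.copy()):
--             for i in range(12):
--                 yield (pattern * i) + pattern_tail
--
--     else:
--         raise NotImplementedError
-- ===== SOURCE B (Python) =====
-- def make_all_patterns(structured_pattern):
--     # Validate and build the option list for every element up front.
--     options = []
--     for pattern, pattern_type in structured_pattern:
--         if pattern_type == "=":
--             options.append([pattern])
--         elif pattern_type == "?":
--             options.append([pattern, ""])
--         elif pattern_type == "*":
--             options.append([pattern * i for i in range(12)])
--         else:
--             raise NotImplementedError
--     # Iterative cartesian product, built right-to-left so that the first
--     # element varies fastest (matching A's enumeration order).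
--     combos = [""]
--     for opts in reversed(options):
--         combos = [o + c for c in combos for o in opts]
--     yield from combos
-- ===== Notes on version B (the rewrite author's own statement) =====
-- stated objective: alternative
-- what changed: Replaces A's recursive generator (one recursion level per pattern element, with list copies) by a single validation pass that builds a per-element option list and then an iterative cartesian product folded right-to-left, so the first element varies fastest exactly as in A; B does not mutate the caller's list (A pops its first element when first advanced).
import Mathlib
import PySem

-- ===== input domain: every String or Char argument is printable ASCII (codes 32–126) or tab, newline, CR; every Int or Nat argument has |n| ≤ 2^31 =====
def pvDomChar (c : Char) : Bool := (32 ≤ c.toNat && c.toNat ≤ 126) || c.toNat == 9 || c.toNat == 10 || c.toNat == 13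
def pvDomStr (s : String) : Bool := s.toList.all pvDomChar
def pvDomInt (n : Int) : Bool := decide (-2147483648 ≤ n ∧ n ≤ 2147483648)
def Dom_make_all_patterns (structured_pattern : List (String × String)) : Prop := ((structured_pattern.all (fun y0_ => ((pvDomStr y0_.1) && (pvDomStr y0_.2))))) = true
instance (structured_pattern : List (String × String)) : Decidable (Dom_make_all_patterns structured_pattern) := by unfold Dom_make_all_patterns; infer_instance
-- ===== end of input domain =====

-- B replaces A's recursive generator by a single validation pass plus an iterative
-- cartesian product built right-to-left (objective: idiomatic/alternative, same cost).
-- Side effect: A pops the first element off the caller's list when first advanced;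
-- B leaves its argument unmodified — the equivalence proved here is about the
-- returned (yielded) values only.

-- ===== PORT A =====
-- Python 'p * n' for a string p and n ≥ 0 (exact: Python repeats the string n times).
def strMul (p : String) : Nat → String
  | 0 => ""
  | n + 1 => strMul p n ++ p

def make_all_patterns (structured_pattern : List (String × String)) : List String :=
  match structured_pattern with
  | [] => [""]
  | (pattern, pattern_type) :: rest =>
    let tails := make_all_patterns rest
    if pattern_type = "=" then
      tails.map (fun pattern_tail => pattern ++ pattern_tail)
    else if pattern_type = "?" then
      tails.flatMap (fun pattern_tail => [pattern ++ pattern_tail, pattern_tail])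
    else if pattern_type = "*" then
      tails.flatMap (fun pattern_tail =>
        (PySem.List.pyRange 0 12 1).map (fun i => strMul pattern i.toNat ++ pattern_tail))
    else []  -- NotImplementedError: excluded by Pre_make_all_patterns

-- ===== PORT B =====
-- per-element option list (the first loop of Source B; the 'else: raise' arm is excluded by Pre_)
def pvOptsOf (e : String × String) : List String :=
  if e.2 = "=" then [e.1]
  else if e.2 = "?" then [e.1, ""]
  else if e.2 = "*" then (List.range 12).map (fun i => strMul e.1 i)
  else []

def make_all_patterns_alt (structured_pattern : List (String × String)) : List String :=
  let options := structured_pattern.map pvOptsOf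
  options.reverse.foldl
    (fun combos opts => combos.flatMap (fun c => opts.map (fun o => o ++ c))) [""]

-- ===== PRECONDITION & SPEC =====
-- A raises NotImplementedError when any pattern_type is not '=', '?' or '*'; exactly those inputs are excluded.
def Pre_make_all_patterns (structured_pattern : List (String × String)) : Prop :=
  ∀ e ∈ structured_pattern, e.2 = "=" ∨ e.2 = "?" ∨ e.2 = "*"
instance (structured_pattern : List (String × String)) : Decidable (Pre_make_all_patterns structured_pattern) := by unfold Pre_make_all_patterns; infer_instance

def pvWitness_make_all_patterns : (List (String × String)) := [("ab", "="), ("c", "?"), ("d", "*")]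

def Spec_make_all_patterns (structured_pattern : List (String × String)) (out : List String) : Prop := out = make_all_patterns_alt structured_pattern
instance (structured_pattern : List (String × String)) (out : List String) : Decidable (Spec_make_all_patterns structured_pattern out) := by unfold Spec_make_all_patterns; infer_instance

-- ===== CLAIM (what is proved, stated in full; the proofs are below) =====
def Claim_equal_make_all_patterns : Prop := ∀ (structured_pattern : List (String × String)), Dom_make_all_patterns structured_pattern → Pre_make_all_patterns structured_pattern → Spec_make_all_patterns structured_pattern (make_all_patterns structured_pattern)

-- ===== LEMMAS AND PROOFS =====

-- Peeling one element off B's fold: the right-to-left product over (e :: rest)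
-- is the product over rest, extended on the left by e's options.
theorem alt_cons (e : String × String) (rest : List (String × String)) :
    make_all_patterns_alt (e :: rest)
      = (make_all_patterns_alt rest).flatMap
          (fun c => (pvOptsOf e).map (fun o => o ++ c)) := by
  simp [make_all_patterns_alt, List.foldl_append]

theorem flatMap_one {α β : Type} (f : α → β) (l : List α) :
    l.flatMap (fun c => [f c]) = l.map f := by
  induction l with
  | nil => rfl
  | cons a l ih => simp [List.flatMap_cons, ih]

theorem make_all_patterns_spec' (structured_pattern : List (String × String))
    (hpre : Pre_make_all_patterns structured_pattern) :
    make_all_patterns structured_pattern = make_all_patterns_alt structured_pattern := by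
  induction structured_pattern with
  | nil => simp [make_all_patterns, make_all_patterns_alt]
  | cons e rest ih =>
    obtain ⟨p, t⟩ := e
    have htail : make_all_patterns rest = make_all_patterns_alt rest :=
      ih (fun x hx => hpre x (List.mem_cons_of_mem _ hx))
    have ht : t = "=" ∨ t = "?" ∨ t = "*" := hpre (p, t) (List.mem_cons_self)
    rw [alt_cons]
    rcases ht with h | h | h <;> subst h
    · simp [make_all_patterns, pvOptsOf, htail, flatMap_one]
    · simp [make_all_patterns, pvOptsOf, htail]
    · have hr : PySem.List.pyRange 0 12 1 = [0,1,2,3,4,5,6,7,8,9,10,11] := by decide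
      have hn : List.range 12 = [0,1,2,3,4,5,6,7,8,9,10,11] := by decide
      simp [make_all_patterns, pvOptsOf, htail, hr, hn]

-- ===== VERDICT (by name: the statement is the Claim_ definition above) =====
theorem make_all_patterns_spec : Claim_equal_make_all_patterns := by
  intro sp _ hpre
  exact make_all_patterns_spec' sp hpre
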